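-- pv_equiv track=rewrite | github.com/seantywork/hack | 0xutil/sheet-beater/beater_mod.py | calculate_col_address_by_col
-- ===== SOURCE A (Python) =====
-- def calculate_col_address_by_col(total_col):
--
--
--     begin = 65
--
--     end = 90
--
--     ret_iter = []
--
--     head = ''
--
--     head_ptr = begin
--
--     ptr = begin
--
--     for i in range(total_col):
--
--         addr = head + chr(ptr)
--
--         ret_iter.append(addr)
--
--         ptr += 1
--
--         if ptr > end :
--
--             ptr = begin
--
--             head = chr(head_ptr)
--
--             head_ptr += 1
--
--
--     return ret_iter[-1]
-- ===== SOURCE B (Python) =====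
-- def calculate_col_address_by_col(total_col):
--     q, r = divmod(total_col - 1, 26)
--     if q == 0:
--         return chr(65 + r)
--     return chr(64 + q) + chr(65 + r)
-- ===== Notes on version B (the rewrite author's own statement) =====
-- stated objective: faster
-- what changed: Replaces the O(n) loop that builds a list of all n column labels with a closed-form div/mod computation of only the last label's head and tail characters; Pre_ excludes the window where the label's head is a lone surrogate (both programs return the identical str there, but it is not representable as a Lean String).
import Mathlib
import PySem

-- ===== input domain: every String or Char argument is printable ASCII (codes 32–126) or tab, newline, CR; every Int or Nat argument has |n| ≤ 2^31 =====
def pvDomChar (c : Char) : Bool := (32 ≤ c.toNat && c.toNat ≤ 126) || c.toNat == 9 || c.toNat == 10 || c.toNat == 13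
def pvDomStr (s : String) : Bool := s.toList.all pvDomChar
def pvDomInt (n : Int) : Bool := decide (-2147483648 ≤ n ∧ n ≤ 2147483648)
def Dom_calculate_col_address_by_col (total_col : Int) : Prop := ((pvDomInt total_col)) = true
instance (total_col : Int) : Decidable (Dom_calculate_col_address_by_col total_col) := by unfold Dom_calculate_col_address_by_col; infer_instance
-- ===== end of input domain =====

-- B replaces A's O(n) loop over all n labels by a closed-form div/mod computation of the last label only.

-- chr(n): exact for 0 ≤ n ≤ 0x10FFFF outside the surrogate range (Pre_ keeps every chr the output uses there)
def pvChr (n : Int) : Char := Char.ofNat n.toNat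

-- ===== PORT A =====
-- one iteration of A's for-loop body over the state (ret_iter, head, head_ptr, ptr)
def pvAStep (s : List String × String × Int × Int) : List String × String × Int × Int :=
  match s with
  | (ret, head, head_ptr, ptr) =>
    let addr := head ++ String.ofList [pvChr ptr]
    let ret := ret ++ [addr]
    let ptr := ptr + 1
    if ptr > 90 then (ret, String.ofList [pvChr head_ptr], head_ptr + 1, 65)
    else (ret, head, head_ptr, ptr)

def calculate_col_address_by_col (total_col : Int) : String :=
  let st := (PySem.List.pyRange 0 total_col 1).foldl (fun s _ => pvAStep s) ([], "", 65, 65)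
  (PySem.List.pyGet? st.1 (-1)).getD ""   -- ret_iter[-1]; IndexError (none) iff total_col ≤ 0, excluded by Pre_

-- ===== PORT B =====
def calculate_col_address_by_col_alt (total_col : Int) : String :=
  let q := PySem.Int.floordiv (total_col - 1) 26
  let r := PySem.Int.mod (total_col - 1) 26
  if q = 0 then String.ofList [pvChr (65 + r)]
  else String.ofList [pvChr (64 + q), pvChr (65 + r)]

-- ===== PRECONDITION & SPEC =====
-- Pre_ excludes: total_col ≤ 0 (A raises IndexError on ret_iter[-1]); total_col > 28965247 (A's chr(head_ptr)
-- exceeds 0x10FFFF and raises ValueError); and the window where the label's head character (whose code grows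
-- with the quotient of total_col by the alphabet size) is a lone surrogate U+D800..U+DFFF — there A and B return the SAME Python str, but that str is not
-- representable as a Lean String, so the value cannot be ported (see claim cites).
def Pre_calculate_col_address_by_col (total_col : Int) : Prop :=
  1 ≤ total_col ∧ total_col ≤ 28965247 ∧
    (PySem.Int.floordiv (total_col - 1) 26 < 55232 ∨ 57280 ≤ PySem.Int.floordiv (total_col - 1) 26)
instance (total_col : Int) : Decidable (Pre_calculate_col_address_by_col total_col) := by
  unfold Pre_calculate_col_address_by_col; infer_instance

def pvWitness_calculate_col_address_by_col : Int := 30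

def Spec_calculate_col_address_by_col (total_col : Int) (out : String) : Prop := out = calculate_col_address_by_col_alt total_col
instance (total_col : Int) (out : String) : Decidable (Spec_calculate_col_address_by_col total_col out) := by unfold Spec_calculate_col_address_by_col; infer_instance

-- ===== CLAIM (what is proved, stated in full; the proofs are below) =====
def Claim_equal_calculate_col_address_by_col : Prop := ∀ (total_col : Int), Dom_calculate_col_address_by_col total_col → Pre_calculate_col_address_by_col total_col → Spec_calculate_col_address_by_col total_col (calculate_col_address_by_col total_col)

-- ===== LEMMAS AND PROOFS =====

-- head string after N iterations of A's loop
def pvHd (N : Nat) : String := if N < 26 then "" else String.ofList [pvChr (64 + (N / 26 : Nat))]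
-- label produced by iteration N (0-based)
def pvLab (N : Nat) : String := pvHd N ++ String.ofList [pvChr (65 + (N % 26 : Nat))]

theorem pv_fold_const (l : List Int) (s : List String × String × Int × Int) :
    l.foldl (fun s _ => pvAStep s) s = pvAStep^[l.length] s := by
  induction l generalizing s with
  | nil => rfl
  | cons a l ih => simp [List.foldl_cons, ih, Function.iterate_succ_apply]

theorem pv_iter_inv (N : Nat) :
    pvAStep^[N] ([], "", 65, 65)
      = ((List.range N).map pvLab, pvHd N, (65 + (N / 26 : Nat) : Int), (65 + (N % 26 : Nat) : Int)) := by
  induction N with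
  | zero => simp [pvHd]
  | succ N ih =>
    rw [Function.iterate_succ_apply', ih]
    simp only [pvAStep, List.range_succ, List.map_append, List.map_cons, List.map_nil]
    split_ifs with h
    · simp only [Prod.mk.injEq]
      refine ⟨rfl, ?_, by omega, by omega⟩
      unfold pvHd
      rw [if_neg (by omega : ¬ N + 1 < 26),
        (by omega : (64:Int) + ((N + 1) / 26 : Nat) = 65 + (N / 26 : Nat))]
    · simp only [Prod.mk.injEq]
      refine ⟨rfl, ?_, by omega, by omega⟩
      unfold pvHd
      rw [(by omega : (N + 1) / 26 = N / 26)]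
      exact if_congr (by omega) rfl rfl

theorem pv_str_ofList_append (xs ys : List Char) :
    String.ofList xs ++ String.ofList ys = String.ofList (xs ++ ys) := by
  apply String.ext; simp

-- ===== VERDICT (by name: the statement is the Claim_ definition above) =====
theorem calculate_col_address_by_col_spec : Claim_equal_calculate_col_address_by_col := by
  intro t _ hpre
  obtain ⟨h1, -, -⟩ := hpre
  unfold Spec_calculate_col_address_by_col
  set N := t.toNat with hN
  have hN1 : 1 ≤ N := by omega
  -- A side
  have hA : calculate_col_address_by_col t = pvLab (N - 1) := by
    simp only [calculate_col_address_by_col]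
    rw [pv_fold_const, PySem.List.length_pyRange_one, Int.sub_zero, pv_iter_inv]
    have hlen : 1 ≤ ((List.range N).map pvLab).length := by simpa using hN1
    rw [PySem.List.pyGet?_neg_ofNat ((List.range N).map pvLab) 1 (by omega) hlen]
    simp only [List.length_map, List.length_range]
    rw [List.getElem?_map, List.getElem?_range (by omega : N - 1 < N)]
    rfl
  rw [hA]
  -- B side
  simp only [calculate_col_address_by_col_alt]
  have hc : t - 1 = ((N - 1 : Nat) : Int) := by omega
  have hq : PySem.Int.floordiv (t - 1) 26 = (((N - 1) / 26 : Nat) : Int) := by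
    rw [hc]; exact_mod_cast PySem.Int.floordiv_natCast (N - 1) 26
  have hr : PySem.Int.mod (t - 1) 26 = (((N - 1) % 26 : Nat) : Int) := by
    rw [hc]; exact_mod_cast PySem.Int.mod_natCast (N - 1) 26
  rw [hq, hr]
  by_cases hsmall : (N - 1) / 26 = 0
  · rw [if_pos (by exact_mod_cast congrArg (Nat.cast : Nat → Int) hsmall)]
    unfold pvLab pvHd
    rw [if_pos (by omega)]
    apply String.ext; simp
  · rw [if_neg (by exact_mod_cast hsmall)]
    unfold pvLab pvHd
    rw [if_neg (by omega), pv_str_ofList_append]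
    rw [(by omega : (64:Int) + ((N - 1) / 26 : Nat) = 64 + (((N - 1) / 26 : Nat) : Int))]
    rfl
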